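-- pv_equiv track=rewrite | github.com/svc-user/ReadUp | core.py | get_word_indices_and_lengths
-- ===== SOURCE A (Python) =====
-- def get_word_indices_and_lengths(text, offset):
--     result = []
--     word_start = None  # Tracks the start index of a word
--
--     for i, char in enumerate(text):
--         if not char.isspace():  # Character is part of a word
--             if word_start is None:
--                 word_start = i  # Mark the start of the word
--         else:  # Character is whitespace
--             if word_start is not None:
--                 # Calculate the word length and append the tuple
--                 word_length = i - word_start
--                 result.append((offset + word_start, word_length))
--                 word_start = None  # Reset the word start
--
--     # Handle the last word if it ends without trailing whitespace
--     if word_start is not None: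
--         word_length = len(text) - word_start
--         result.append((offset + word_start, word_length))
--
--     return result
-- ===== SOURCE B (Python) =====
-- from itertools import groupby
--
-- def get_word_indices_and_lengths(text, offset):
--     result = []
--     pos = 0
--     for is_space, group in groupby(text, key=str.isspace):
--         run_length = sum(1 for _ in group)
--         if not is_space:
--             result.append((offset + pos, run_length))
--         pos += run_length
--     return result
-- ===== Notes on version B (the rewrite author's own statement) =====
-- stated objective: idiomatic
-- what changed: Replaces the word_start/reset state machine and its post-loop tail branch with itertools.groupby runs keyed by isspace, keeping a running position and emitting (offset+pos, run_length) for each non-space run.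
import Mathlib
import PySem

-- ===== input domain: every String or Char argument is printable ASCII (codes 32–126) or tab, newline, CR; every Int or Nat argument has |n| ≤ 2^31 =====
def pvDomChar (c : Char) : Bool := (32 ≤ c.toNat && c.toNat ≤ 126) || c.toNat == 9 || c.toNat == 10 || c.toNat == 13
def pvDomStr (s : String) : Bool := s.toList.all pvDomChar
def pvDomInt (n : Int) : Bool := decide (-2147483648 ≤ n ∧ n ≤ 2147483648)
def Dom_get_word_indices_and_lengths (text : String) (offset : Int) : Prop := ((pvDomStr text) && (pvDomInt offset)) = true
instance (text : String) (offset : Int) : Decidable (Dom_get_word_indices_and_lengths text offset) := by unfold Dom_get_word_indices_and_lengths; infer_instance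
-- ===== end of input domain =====

-- B replaces A's word_start/reset state machine (with its post-loop tail branch) by
-- itertools.groupby-style runs keyed by isspace, emitting each non-space run directly (idiomatic).

-- ===== PORT A =====
-- the loop body of A: state = (result, word_start), one enumerated character
def pvStepA (offset : Int) (st : List (Int × Int) × Option Int) (p : Int × Char) :
    List (Int × Int) × Option Int :=
  if !(PySem.Chars.isspace p.2) then
    match st.2 with
    | none => (st.1, some p.1)
    | some _ => st
  else
    match st.2 with
    | some ws => (st.1 ++ [(offset + ws, p.1 - ws)], none)
    | none => st

-- A's post-loop branch: flush the last word (n = len(text))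
def pvFinishA (offset : Int) (n : Int) (st : List (Int × Int) × Option Int) : List (Int × Int) :=
  match st.2 with
  | some ws => st.1 ++ [(offset + ws, n - ws)]
  | none => st.1

def get_word_indices_and_lengths (text : String) (offset : Int) : List (Int × Int) :=
  pvFinishA offset (text.toList.length : Int)
    ((PySem.List.enumerate text.toList 0).foldl (pvStepA offset) ([], none))

-- ===== PORT B =====
-- itertools.groupby(text, key=str.isspace): the list of (is_space, run_length) runs
def pvRuns : List Char → List (Bool × Nat)
  | [] => []
  | c :: rest =>
    (PySem.Chars.isspace c,
      (rest.takeWhile (fun x => PySem.Chars.isspace x == PySem.Chars.isspace c)).length + 1)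
    :: pvRuns (rest.dropWhile (fun x => PySem.Chars.isspace x == PySem.Chars.isspace c))
termination_by l => l.length
decreasing_by
  simp only [List.length_cons]
  exact Nat.lt_succ_of_le (List.length_dropWhile_le _ _)

-- B's loop body: state = (result, pos), one run
def pvStepB (offset : Int) (st : List (Int × Int) × Int) (r : Bool × Nat) :
    List (Int × Int) × Int :=
  ((if r.1 = false then st.1 ++ [(offset + st.2, (r.2 : Int))] else st.1), st.2 + r.2)

def get_word_indices_and_lengths_alt (text : String) (offset : Int) : List (Int × Int) :=
  ((pvRuns text.toList).foldl (pvStepB offset) ([], 0)).1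

-- ===== PRECONDITION & SPEC =====
def Spec_get_word_indices_and_lengths (text : String) (offset : Int) (out : List (Int × Int)) : Prop := out = get_word_indices_and_lengths_alt text offset
instance (text : String) (offset : Int) (out : List (Int × Int)) : Decidable (Spec_get_word_indices_and_lengths text offset out) := by unfold Spec_get_word_indices_and_lengths; infer_instance

-- ===== CLAIM (what is proved, stated in full; the proofs are below) =====
def Claim_equal_get_word_indices_and_lengths : Prop := ∀ (text : String) (offset : Int), Dom_get_word_indices_and_lengths text offset → Spec_get_word_indices_and_lengths text offset (get_word_indices_and_lengths text offset)

-- ===== LEMMAS AND PROOFS =====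

-- functional form of B's fold
def pvBspec (offset : Int) : Int → List (Bool × Nat) → List (Int × Int)
  | _, [] => []
  | pos, (false, k) :: rs => (offset + pos, (k : Int)) :: pvBspec offset (pos + k) rs
  | pos, (true, k) :: rs => pvBspec offset (pos + k) rs

theorem pv_bfold (offset : Int) (runs : List (Bool × Nat)) :
    ∀ (res : List (Int × Int)) (pos : Int),
      (runs.foldl (pvStepB offset) (res, pos)).1 = res ++ pvBspec offset pos runs := by
  induction runs with
  | nil => intro res pos; simp [pvBspec]
  | cons r rs ih =>
    intro res pos
    obtain ⟨b, k⟩ := r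
    cases b <;> simp [pvStepB, pvBspec, ih]

theorem pv_stay (offset : Int) (run : List Char)
    (h : ∀ c ∈ run, PySem.Chars.isspace c = false) :
    ∀ (i : Int) (res : List (Int × Int)) (w : Int),
      (PySem.List.enumerate run i).foldl (pvStepA offset) (res, some w) = (res, some w) := by
  induction run with
  | nil => intro i res w; simp
  | cons c rest ih =>
    intro i res w
    have hc : PySem.Chars.isspace c = false := h c (by simp)
    rw [PySem.List.enumerate_cons]
    simp only [List.foldl_cons, pvStepA, hc]
    exact ih (fun x hx => h x (by simp [hx])) (i + 1) res w

theorem pv_word (offset : Int) (c : Char) (rest : List Char)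
    (hc : PySem.Chars.isspace c = false)
    (h : ∀ x ∈ rest, PySem.Chars.isspace x = false)
    (i : Int) (res : List (Int × Int)) :
    (PySem.List.enumerate (c :: rest) i).foldl (pvStepA offset) (res, none) = (res, some i) := by
  rw [PySem.List.enumerate_cons]
  simp only [List.foldl_cons, pvStepA, hc]
  exact pv_stay offset rest h (i + 1) res i

-- unfolding pvRuns at a non-space head, with the predicate rewritten
theorem pv_runs_cons_false (c : Char) (rest : List Char)
    (hc' : PySem.Chars.isspace c = false) :
    pvRuns (c :: rest)
      = (false, (rest.takeWhile (fun x => PySem.Chars.isspace x == false)).length + 1)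
        :: pvRuns (rest.dropWhile (fun x => PySem.Chars.isspace x == false)) := by
  rw [pvRuns, hc']

-- the head of a non-empty dropWhile residue falsifies the predicate
theorem pv_dropWhile_head_false {α : Type} (p : α → Bool) (l : List α) (d : α) (t : List α)
    (h : l.dropWhile p = d :: t) : p d = false := by
  induction l with
  | nil => simp at h
  | cons a l ih =>
    rw [List.dropWhile_cons] at h
    by_cases hpa : p a = true
    · rw [if_pos hpa] at h
      exact ih h
    · rw [if_neg hpa] at h
      cases h
      simpa using hpa

-- skipping one leading space character only shifts B's running position
theorem pv_bspec_space (offset : Int) (d : Char) (hd : PySem.Chars.isspace d = true)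
    (rest : List Char) (j : Int) :
    pvBspec offset j (pvRuns (d :: rest)) = pvBspec offset (j + 1) (pvRuns rest) := by
  cases rest with
  | nil => simp [pvRuns, pvBspec, hd]
  | cons e r3 =>
    by_cases he : PySem.Chars.isspace e = true
    · rw [pvRuns, pvRuns]
      simp only [hd, he, List.takeWhile_cons, List.dropWhile_cons, beq_self_eq_true, if_true,
        List.length_cons, pvBspec]
      rw [show j + (((r3.takeWhile (fun x => PySem.Chars.isspace x == true)).length + 1 + 1
            : Nat) : Int)
          = (j + 1) + (((r3.takeWhile (fun x => PySem.Chars.isspace x == true)).length + 1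
            : Nat) : Int) by push_cast; ring]
    · have he' : PySem.Chars.isspace e = false := by
        cases hq : PySem.Chars.isspace e <;> simp_all
      rw [pvRuns]
      simp only [hd, List.takeWhile_cons, List.dropWhile_cons, he']
      simp only [show ((false == true) = true) = False by simp, if_false, List.length_nil,
        pvBspec]
      rw [show j + ((0 + 1 : Nat) : Int) = j + 1 by push_cast; ring]

theorem pv_main (offset : Int) :
    ∀ (n : Nat) (l : List Char), l.length ≤ n → ∀ (i : Int) (res : List (Int × Int)),
      pvFinishA offset (i + (l.length : Int))
          ((PySem.List.enumerate l i).foldl (pvStepA offset) (res, none))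
        = res ++ pvBspec offset i (pvRuns l) := by
  intro n
  induction n with
  | zero =>
    intro l hl i res
    have : l = [] := List.eq_nil_of_length_eq_zero (Nat.le_zero.mp hl)
    subst this
    simp [pvFinishA, pvRuns, pvBspec]
  | succ n ih =>
    intro l hl i res
    cases l with
    | nil => simp [pvFinishA, pvRuns, pvBspec]
    | cons c rest =>
      by_cases hc : PySem.Chars.isspace c = true
      · -- leading whitespace character: state unchanged, position shifts by one
        rw [PySem.List.enumerate_cons, List.foldl_cons,
          show pvStepA offset (res, none) (i, c) = (res, none) by simp [pvStepA, hc],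
          show i + (((c :: rest).length : Nat) : Int) = (i + 1) + (rest.length : Int) by
            simp only [List.length_cons]; push_cast; ring,
          ih rest (Nat.le_of_succ_le_succ hl) (i + 1) res,
          pv_bspec_space offset c hc rest i]
      · -- leading word run
        have hc' : PySem.Chars.isspace c = false := by
          cases hq : PySem.Chars.isspace c <;> simp_all
        have hsplit : rest
            = rest.takeWhile (fun x => PySem.Chars.isspace x == false)
              ++ rest.dropWhile (fun x => PySem.Chars.isspace x == false) :=
          (List.takeWhile_append_dropWhile).symm
        have htw : ∀ x ∈ rest.takeWhile (fun x => PySem.Chars.isspace x == false),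
            PySem.Chars.isspace x = false := by
          intro x hx
          have := List.mem_takeWhile_imp hx
          simpa using this
        have henum : PySem.List.enumerate (c :: rest) i
            = PySem.List.enumerate
                (c :: rest.takeWhile (fun x => PySem.Chars.isspace x == false)) i
              ++ PySem.List.enumerate
                  (rest.dropWhile (fun x => PySem.Chars.isspace x == false))
                  (i + (((rest.takeWhile (fun x => PySem.Chars.isspace x == false)).length
                        + 1 : Nat) : Int)) := by
          conv_lhs =>
            rw [show (c :: rest)
                = (c :: rest.takeWhile (fun x => PySem.Chars.isspace x == false))
                  ++ rest.dropWhile (fun x => PySem.Chars.isspace x == false) by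
              rw [List.cons_append, ← hsplit]]
          rw [PySem.List.enumerate_append]
          simp [Nat.add_comm]
        rw [henum, List.foldl_append, pv_word offset c _ hc' htw i res,
          pv_runs_cons_false c rest hc']
        cases hdrop : rest.dropWhile (fun x => PySem.Chars.isspace x == false) with
        | nil =>
          have hlenr : rest.length
              = (rest.takeWhile (fun x => PySem.Chars.isspace x == false)).length := by
            have hx := congrArg List.length hsplit
            rw [hdrop] at hx
            simp only [List.length_append, List.length_nil, Nat.add_zero] at hx
            exact hx
          rw [show i + (((c :: rest).length : Nat) : Int)
              = i + (((rest.takeWhile (fun x => PySem.Chars.isspace x == false)).length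
                    + 1 : Nat) : Int) by rw [List.length_cons, hlenr]]
          simp only [PySem.List.enumerate_nil, List.foldl_nil, pvFinishA, pvBspec, pvRuns]
          rw [show i + (((rest.takeWhile (fun x => PySem.Chars.isspace x == false)).length
                + 1 : Nat) : Int) - i
              = (((rest.takeWhile (fun x => PySem.Chars.isspace x == false)).length
                + 1 : Nat) : Int) by ring]
        | cons d rest'' =>
          have hd : PySem.Chars.isspace d = true := by
            have := pv_dropWhile_head_false _ rest d rest'' hdrop
            simpa using this
          have hlen : rest.length
              = (rest.takeWhile (fun x => PySem.Chars.isspace x == false)).length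
                + (rest''.length + 1) := by
            have hx := congrArg List.length hsplit
            rw [hdrop] at hx
            simp only [List.length_append, List.length_cons] at hx
            exact hx
          have hlen'' : rest''.length ≤ n := by
            have h1 : (c :: rest).length ≤ n + 1 := hl
            simp only [List.length_cons] at h1
            omega
          rw [PySem.List.enumerate_cons, List.foldl_cons,
            show pvStepA offset (res, some i)
                ((i + (((rest.takeWhile (fun x => PySem.Chars.isspace x == false)).length
                      + 1 : Nat) : Int)), d)
              = (res ++ [(offset + i,
                  (i + (((rest.takeWhile (fun x => PySem.Chars.isspace x == false)).length
                        + 1 : Nat) : Int)) - i)], none) by simp [pvStepA, hd],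
            show i + (((c :: rest).length : Nat) : Int)
              = (i + (((rest.takeWhile (fun x => PySem.Chars.isspace x == false)).length
                    + 1 : Nat) : Int) + 1) + (rest''.length : Int) by
              simp only [List.length_cons]; rw [hlen]; push_cast; ring,
            ih rest'' hlen''
              (i + (((rest.takeWhile (fun x => PySem.Chars.isspace x == false)).length
                    + 1 : Nat) : Int) + 1) _,
            pvBspec,
            pv_bspec_space offset d hd rest''
              (i + (((rest.takeWhile (fun x => PySem.Chars.isspace x == false)).length
                    + 1 : Nat) : Int)),
            show (i + (((rest.takeWhile (fun x => PySem.Chars.isspace x == false)).length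
                  + 1 : Nat) : Int)) - i
              = (((rest.takeWhile (fun x => PySem.Chars.isspace x == false)).length
                  + 1 : Nat) : Int) by ring]
          simp

-- ===== VERDICT (by name: the statement is the Claim_ definition above) =====
theorem get_word_indices_and_lengths_spec : Claim_equal_get_word_indices_and_lengths := by
  intro text offset _
  unfold Spec_get_word_indices_and_lengths
  unfold get_word_indices_and_lengths get_word_indices_and_lengths_alt
  rw [pv_bfold offset _ [] 0]
  have h := pv_main offset text.toList.length text.toList (le_refl _) 0 []
  rw [zero_add] at h
  rw [h]
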